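-- pv_equiv track=rewrite | github.com/ITT-25/assignment-02-dsp-Coldjack007 | karaoke_game/karaoke.py | add_time_to_next_note_start
-- ===== SOURCE A (Python) =====
-- def add_time_to_next_note_start(song):
--     song_with_time_to_next_note_start = []
--     for i in range(len(song)):
--         id, start, end, freq = song[i]
--         if i < len(song) - 1:
--             next_start = song[i + 1][1]
--             time_to_next_note_start = next_start - start
--         else:
--             time_to_next_note_start = None
--         song_with_time_to_next_note_start.append((id, start, freq, time_to_next_note_start))
--     return song_with_time_to_next_note_start
-- ===== SOURCE B (Python) =====
-- def add_time_to_next_note_start(song):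
--     result = []
--     next_start = None
--     for id, start, end, freq in reversed(song):
--         time = None if next_start is None else next_start - start
--         result.append((id, start, freq, time))
--         next_start = start
--     result.reverse()
--     return result
-- ===== Notes on version B (the rewrite author's own statement) =====
-- stated objective: alternative
-- what changed: Replaced the index loop that looks ahead at song[i+1] with a single reverse traversal carrying a next_start accumulator, building the annotated list back-to-front.
import Mathlib
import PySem

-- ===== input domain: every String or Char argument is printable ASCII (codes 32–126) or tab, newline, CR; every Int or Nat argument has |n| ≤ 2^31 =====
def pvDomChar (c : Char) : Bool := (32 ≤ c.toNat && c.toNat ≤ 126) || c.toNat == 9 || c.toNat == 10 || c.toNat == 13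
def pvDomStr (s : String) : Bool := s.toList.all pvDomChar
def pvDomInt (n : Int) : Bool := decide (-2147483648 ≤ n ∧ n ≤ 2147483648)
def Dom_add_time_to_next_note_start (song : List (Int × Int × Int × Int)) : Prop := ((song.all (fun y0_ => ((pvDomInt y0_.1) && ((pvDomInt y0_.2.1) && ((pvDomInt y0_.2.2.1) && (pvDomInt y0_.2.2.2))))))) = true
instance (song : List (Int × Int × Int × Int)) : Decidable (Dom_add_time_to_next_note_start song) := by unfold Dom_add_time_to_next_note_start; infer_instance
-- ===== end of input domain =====

-- B replaces A's index loop with look-ahead song[i+1] by a single reverse traversal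
-- carrying a next_start accumulator (alternative decomposition, same cost).


-- ===== PORT A =====
-- Python A: for i in range(len(song)): unpack song[i]; if i < len(song)-1 take
-- next_start = song[i+1][1]; append (id, start, freq, time). Indices are always in
-- range, so song[i] is ported as getD with an unreachable default.
def add_time_to_next_note_start (song : List (Int × Int × Int × Int)) : List (Int × Int × Int × Option Int) :=
  (List.range song.length).foldl (fun acc i =>
    let note := song.getD i (0, 0, 0, 0)
    let time_to_next_note_start : Option Int :=
      if (i : Int) < (song.length : Int) - 1 then
        some ((song.getD (i + 1) (0, 0, 0, 0)).2.1 - note.2.1)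
      else none
    acc ++ [(note.1, note.2.1, note.2.2.2, time_to_next_note_start)]) []

-- ===== PORT B =====
-- B: fold over reversed song with state (next_start, result); reverse result at the end.
def add_time_to_next_note_start_alt (song : List (Int × Int × Int × Int)) : List (Int × Int × Int × Option Int) :=
  let st := song.reverse.foldl
    (fun (st : Option Int × List (Int × Int × Int × Option Int)) note =>
      let time : Option Int := st.1.map (fun n => n - note.2.1)
      (some note.2.1, st.2 ++ [(note.1, note.2.1, note.2.2.2, time)]))
    (none, [])
  st.2.reverse

-- ===== PRECONDITION & SPEC =====
def Spec_add_time_to_next_note_start (song : List (Int × Int × Int × Int)) (out : List (Int × Int × Int × Option Int)) : Prop := out = add_time_to_next_note_start_alt song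
instance (song : List (Int × Int × Int × Int)) (out : List (Int × Int × Int × Option Int)) : Decidable (Spec_add_time_to_next_note_start song out) := by unfold Spec_add_time_to_next_note_start; infer_instance

-- ===== CLAIM (what is proved, stated in full; the proofs are below) =====
def Claim_equal_add_time_to_next_note_start : Prop := ∀ (song : List (Int × Int × Int × Int)), Dom_add_time_to_next_note_start song → Spec_add_time_to_next_note_start song (add_time_to_next_note_start song)

-- ===== LEMMAS AND PROOFS =====

-- reference annotation: nxt is the start time following the LAST element (none at top level)
def pvAnn (nxt : Option Int) : List (Int × Int × Int × Int) → List (Int × Int × Int × Option Int)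
  | [] => []
  | [a] => [(a.1, a.2.1, a.2.2.2, nxt.map (fun n => n - a.2.1))]
  | a :: b :: rest => (a.1, a.2.1, a.2.2.2, some (b.2.1 - a.2.1)) :: pvAnn nxt (b :: rest)

lemma pvAnn_cons (nxt : Option Int) (a : Int × Int × Int × Int) (rest : List (Int × Int × Int × Int)) :
    pvAnn nxt (a :: rest) =
      (a.1, a.2.1, a.2.2.2,
        (match rest with | [] => nxt | b :: _ => some b.2.1).map (fun n => n - a.2.1)) :: pvAnn nxt rest := by
  cases rest with
  | nil => simp [pvAnn]
  | cons b r => simp [pvAnn]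

-- B's fold over the reversed list, fully characterised
lemma alt_fold_eq (l : List (Int × Int × Int × Int)) (n0 : Option Int)
    (acc0 : List (Int × Int × Int × Option Int)) :
    l.reverse.foldl
      (fun (st : Option Int × List (Int × Int × Int × Option Int)) note =>
        let time : Option Int := st.1.map (fun n => n - note.2.1)
        (some note.2.1, st.2 ++ [(note.1, note.2.1, note.2.2.2, time)]))
      (n0, acc0)
    = ((match l with | [] => n0 | a :: _ => some a.2.1), acc0 ++ (pvAnn n0 l).reverse) := by
  induction l generalizing acc0 with
  | nil => simp [pvAnn]
  | cons a rest ih =>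
      simp only [List.reverse_cons, List.foldl_append, ih, List.foldl_cons, List.foldl_nil]
      rw [pvAnn_cons]
      cases rest <;> simp

lemma alt_eq_ann (song : List (Int × Int × Int × Int)) :
    add_time_to_next_note_start_alt song = pvAnn none song := by
  unfold add_time_to_next_note_start_alt
  rw [alt_fold_eq]
  simp

-- A's body as a map over indices
def pvG (song : List (Int × Int × Int × Int)) (i : ℕ) : Int × Int × Int × Option Int :=
  let note := song.getD i (0, 0, 0, 0)
  (note.1, note.2.1, note.2.2.2,
    if (i : Int) < (song.length : Int) - 1 then
      some ((song.getD (i + 1) (0, 0, 0, 0)).2.1 - note.2.1)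
    else none)

lemma foldl_append_map (f : ℕ → Int × Int × Int × Option Int)
    (l : List ℕ) (acc : List (Int × Int × Int × Option Int)) :
    l.foldl (fun acc i => acc ++ [f i]) acc = acc ++ l.map f := by
  induction l generalizing acc with
  | nil => simp
  | cons x xs ih => simp [ih]

lemma a_eq_map (song : List (Int × Int × Int × Int)) :
    add_time_to_next_note_start song = (List.range song.length).map (pvG song) := by
  unfold add_time_to_next_note_start
  show (List.range song.length).foldl (fun acc i => acc ++ [pvG song i]) [] = _
  rw [foldl_append_map]
  simp

lemma pvG_shift (a : Int × Int × Int × Int) (rest : List (Int × Int × Int × Int)) (i : ℕ) :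
    pvG (a :: rest) (i + 1) = pvG rest i := by
  simp only [pvG, List.getD_cons_succ, List.length_cons]
  split_ifs with h1 h2 <;> first | rfl | (exfalso; push_cast at *; omega)

lemma map_g_eq_ann (song : List (Int × Int × Int × Int)) :
    (List.range song.length).map (pvG song) = pvAnn none song := by
  induction song with
  | nil => simp [pvAnn]
  | cons a rest ih =>
      rw [List.length_cons, List.range_succ_eq_map, pvAnn_cons]
      simp only [List.map_cons, List.map_map]
      congr 1
      · cases rest with
        | nil => simp [pvG]
        | cons b r =>
            simp only [pvG, List.getD_cons_zero, List.getD_cons_succ]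
            simp
      · rw [← ih]
        apply List.map_congr_left
        intro i _
        exact pvG_shift a rest i

-- ===== VERDICT (by name: the statement is the Claim_ definition above) =====
theorem add_time_to_next_note_start_spec : Claim_equal_add_time_to_next_note_start := by
  intro song _
  unfold Spec_add_time_to_next_note_start
  rw [alt_eq_ann, a_eq_map, map_g_eq_ann]
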